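-- pv_equiv track=rewrite | github.com/ethanKim93/algorithm_group_study | 0820/이유현/1974_스도쿠_검증/s1.py.py | sudoku_column
-- ===== SOURCE A (Python) =====
-- def sudoku_column(num_list):
--     for j in range(9):
--         rng = list(range(1, 10))
--         for i in range(9):
--             if num_list[i][j] in rng:
--                 rng.remove(num_list[i][j])
--             else:
--                 return 0
--     return 1
-- ===== SOURCE B (Python) =====
-- def sudoku_column(num_list):
--     for j in range(9):
--         for i in range(9):
--             v = num_list[i][j]
--             if not (1 <= v <= 9):
--                 return 0
--             for k in range(i):
--                 if num_list[k][j] == v: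
--                     return 0
--     return 1
-- ===== Notes on version B (the rewrite author's own statement) =====
-- stated objective: alternative
-- what changed: A maintains a mutable pool of still-unused digits per column (list membership + list.remove per cell); B keeps no state at all: each cell is range-checked and then compared directly against every earlier cell of its column by a third nested index loop (brute-force pairwise check instead of a maintained pool).
import Mathlib
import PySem

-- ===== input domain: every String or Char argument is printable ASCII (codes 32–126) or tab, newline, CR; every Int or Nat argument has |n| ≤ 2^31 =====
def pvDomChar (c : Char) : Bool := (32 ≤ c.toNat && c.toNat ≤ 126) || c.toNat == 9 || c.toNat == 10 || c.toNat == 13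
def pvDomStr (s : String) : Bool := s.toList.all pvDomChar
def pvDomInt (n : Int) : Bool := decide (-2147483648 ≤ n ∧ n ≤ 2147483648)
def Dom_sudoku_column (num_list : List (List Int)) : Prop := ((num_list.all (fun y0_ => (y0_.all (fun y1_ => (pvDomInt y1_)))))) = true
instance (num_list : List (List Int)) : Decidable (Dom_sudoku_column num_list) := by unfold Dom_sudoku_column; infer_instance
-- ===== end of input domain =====

-- B replaces A's maintained pool of still-unused digits (list membership + list.remove) by a
-- stateless brute-force check: range-test each cell and compare it directly against every
-- earlier cell of its column (objective: alternative structure, no auxiliary container).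

-- shared cell lookup num_list[i][j]; inside Pre_ every access A/B performs is in range,
-- so getD's default is never consulted (out-of-range is an IndexError, excluded by Pre_)
def pvCell (num_list : List (List Int)) (i j : Int) : Int :=
  (PySem.List.pyGet? ((PySem.List.pyGet? num_list i).getD []) j).getD 0

-- ===== PORT A =====
-- inner 'for i in range(9)' loop; state = pool rng of unused digits; false = 'return 0'
def pvInnerA (num_list : List (List Int)) (j : Int) : List Int → List Int → Bool
  | [], _ => true
  | i :: is, rng =>
      let v := pvCell num_list i j
      if v ∈ rng then pvInnerA num_list j is ((PySem.List.remove? rng v).getD rng)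
      else false

-- outer 'for j in range(9)' loop
def pvOuterA (num_list : List (List Int)) : List Int → Int
  | [] => 1
  | j :: js =>
      if pvInnerA num_list j (PySem.List.pyRange 0 9 1) (PySem.List.pyRange 1 10 1) then
        pvOuterA num_list js
      else 0

def sudoku_column (num_list : List (List Int)) : Int :=
  pvOuterA num_list (PySem.List.pyRange 0 9 1)

-- ===== PORT B =====
-- 'for k in range(i)' loop: does an earlier cell of column j hold v?
def pvDupB (num_list : List (List Int)) (j v : Int) : List Int → Bool
  | [] => false
  | k :: ks => if pvCell num_list k j = v then true else pvDupB num_list j v ks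

-- inner 'for i in range(9)' loop; no accumulator state
def pvInnerB (num_list : List (List Int)) (j : Int) : List Int → Bool
  | [] => true
  | i :: is =>
      let v := pvCell num_list i j
      if ¬ (1 ≤ v ∧ v ≤ 9) then false
      else if pvDupB num_list j v (PySem.List.pyRange 0 i 1) then false
      else pvInnerB num_list j is

def pvOuterB (num_list : List (List Int)) : List Int → Int
  | [] => 1
  | j :: js =>
      if pvInnerB num_list j (PySem.List.pyRange 0 9 1) then pvOuterB num_list js
      else 0

def sudoku_column_alt (num_list : List (List Int)) : Int :=
  pvOuterB num_list (PySem.List.pyRange 0 9 1)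

-- ===== PRECONDITION & SPEC =====
-- helpers for Pre_: cell (i,j) exists; its value; cell (i,j) is 'bad' (out of 1..9 or a
-- duplicate of an earlier value in its column) — conditions on the input only
def pvHasCell (num_list : List (List Int)) (i j : Nat) : Bool :=
  decide (i < num_list.length) && decide (j < (num_list.getD i []).length)
def pvVal (num_list : List (List Int)) (i j : Nat) : Int :=
  (num_list.getD i []).getD j 0
def pvBad (num_list : List (List Int)) (i j : Nat) : Bool :=
  pvHasCell num_list i j &&
    (decide (pvVal num_list i j < 1) || decide (9 < pvVal num_list i j) ||
     decide (∃ i' < i, pvVal num_list i' j = pvVal num_list i j))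

-- Pre_ is exactly the domain of the Python A (and of B, which scans the same cells in the
-- same column-major order and re-reads only already-visited cells): either all 81 cells of
-- the first 9 rows/columns exist, or some bad cell is reached (all cells strictly before it
-- in column-major order exist) — there both return 0 before touching any missing cell;
-- everywhere else Python raises IndexError.
def Pre_sudoku_column (num_list : List (List Int)) : Prop :=
  (∀ j < 9, ∀ i < 9, pvHasCell num_list i j = true) ∨
  (∃ j < 9, ∃ i < 9, pvBad num_list i j = true ∧
    ∀ j' < 9, ∀ i' < 9, (j' < j ∨ (j' = j ∧ i' < i)) → pvHasCell num_list i' j' = true)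
instance (num_list : List (List Int)) : Decidable (Pre_sudoku_column num_list) := by
  unfold Pre_sudoku_column; infer_instance

def pvWitness_sudoku_column : List (List Int) :=
  [[1,2,3,4,5,6,7,8,9],[2,3,4,5,6,7,8,9,1],[3,4,5,6,7,8,9,1,2],
   [4,5,6,7,8,9,1,2,3],[5,6,7,8,9,1,2,3,4],[6,7,8,9,1,2,3,4,5],
   [7,8,9,1,2,3,4,5,6],[8,9,1,2,3,4,5,6,7],[9,1,2,3,4,5,6,7,8]]

def Spec_sudoku_column (num_list : List (List Int)) (out : Int) : Prop := out = sudoku_column_alt num_list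
instance (num_list : List (List Int)) (out : Int) : Decidable (Spec_sudoku_column num_list out) := by unfold Spec_sudoku_column; infer_instance

-- ===== CLAIM (what is proved, stated in full; the proofs are below) =====
def Claim_equal_sudoku_column : Prop := ∀ (num_list : List (List Int)), Dom_sudoku_column num_list → Pre_sudoku_column num_list → Spec_sudoku_column num_list (sudoku_column num_list)

-- ===== LEMMAS AND PROOFS =====

-- B's k-loop finds exactly a duplicate among the scanned earlier cells
theorem pvDupB_iff (num_list : List (List Int)) (j v : Int) (ks : List Int) :
    pvDupB num_list j v ks = true ↔ ∃ k ∈ ks, pvCell num_list k j = v := by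
  induction ks with
  | nil => simp [pvDupB]
  | cons k ks ih =>
      simp only [pvDupB, List.mem_cons]
      split_ifs with h
      · simp [h]
      · simp [ih, h]

-- loop invariant: A's pool rng holds exactly the in-range digits differing from every
-- already-visited cell of the column; then A's pool step and B's brute-force step agree
theorem pvInner_agree (num_list : List (List Int)) (j : Int) :
    ∀ (m : Nat), m ≤ 9 → ∀ (rng : List Int), rng.Nodup →
      (∀ v : Int, v ∈ rng ↔ 1 ≤ v ∧ v ≤ 9 ∧
        ∀ k ∈ PySem.List.pyRange 0 (9 - (m : Int)) 1, pvCell num_list k j ≠ v) →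
      pvInnerA num_list j (PySem.List.pyRange (9 - (m : Int)) 9 1) rng =
      pvInnerB num_list j (PySem.List.pyRange (9 - (m : Int)) 9 1) := by
  intro m
  induction m with
  | zero => intro _ rng _ _; rw [PySem.List.pyRange_one_eq_nil (by omega)]; rfl
  | succ m ih =>
      intro hm rng hnd hinv
      set i : Int := 9 - ((m + 1 : Nat) : Int) with hidef
      have hi : i < 9 := by rw [hidef]; push_cast; omega
      have hi0 : 0 ≤ i := by rw [hidef]; push_cast; omega
      have hstep : i + 1 = 9 - (m : Int) := by rw [hidef]; push_cast; omega
      have hsplit : PySem.List.pyRange 0 (9 - (m : Int)) 1 =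
          PySem.List.pyRange 0 i 1 ++ [i] := by
        rw [← hstep, PySem.List.pyRange_one_succ_right hi0]
      rw [PySem.List.pyRange_one_cons hi]
      simp only [pvInnerA, pvInnerB, hstep]
      set v : Int := pvCell num_list i j with hvdef
      by_cases hv : v ∈ rng
      · obtain ⟨h1, h9, hnk⟩ := (hinv v).mp hv
        rw [if_pos hv, if_neg (not_not.mpr ⟨h1, h9⟩), if_neg (by
          intro hdup
          obtain ⟨k, hk, hkv⟩ := (pvDupB_iff num_list j v _).mp hdup
          exact hnk k hk hkv)]
        rw [PySem.List.remove?_eq_some_erase _ _ hv, Option.getD_some]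
        refine ih (by omega) _ (hnd.erase _) (fun w => ?_)
        rw [List.Nodup.mem_erase_iff hnd, hinv w, hsplit]
        simp only [List.mem_append, List.mem_singleton]
        constructor
        · rintro ⟨hne, h1', h9', hnk'⟩
          refine ⟨h1', h9', fun k hk => ?_⟩
          rcases hk with hk | hk
          · exact hnk' k hk
          · rw [hk]; exact fun h => hne h.symm
        · rintro ⟨h1', h9', hnk'⟩
          exact ⟨fun h => hnk' i (Or.inr rfl) h.symm, h1', h9',
            fun k hk => hnk' k (Or.inl hk)⟩
      · rw [if_neg hv]
        by_cases hr : 1 ≤ v ∧ v ≤ 9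
        · have hnotall : ¬ ∀ k ∈ PySem.List.pyRange 0 i 1, pvCell num_list k j ≠ v :=
            fun hall => hv ((hinv v).mpr ⟨hr.1, hr.2, hall⟩)
          push Not at hnotall
          obtain ⟨k, hk, hkv⟩ := hnotall
          rw [if_neg (not_not.mpr hr),
              if_pos ((pvDupB_iff num_list j v _).mpr ⟨k, hk, hkv⟩)]
        · rw [if_pos hr]

theorem pvOuter_agree (num_list : List (List Int)) :
    ∀ js : List Int, pvOuterA num_list js = pvOuterB num_list js := by
  intro js
  induction js with
  | nil => rfl
  | cons j js ih =>
      simp only [pvOuterA, pvOuterB]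
      have h9 : PySem.List.pyRange 0 9 1 = PySem.List.pyRange (9 - ((9 : Nat) : Int)) 9 1 := by
        norm_num
      rw [h9, pvInner_agree num_list j 9 (by omega) _
            (PySem.List.nodup_pyRange_one 1 10)
            (fun v => by
              rw [PySem.List.mem_pyRange_one]
              constructor
              · intro h
                refine ⟨by omega, by omega, fun k hk => ?_⟩
                rw [show (9 : Int) - ((9 : Nat) : Int) = 0 by norm_num,
                    PySem.List.pyRange_one_eq_nil (by omega)] at hk
                simp at hk
              · intro ⟨h1, h9, _⟩; omega),
          ih]

-- ===== VERDICT (by name: the statement is the Claim_ definition above) =====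
theorem sudoku_column_spec : Claim_equal_sudoku_column := by
  intro num_list _ _
  unfold Spec_sudoku_column sudoku_column sudoku_column_alt
  exact pvOuter_agree num_list _
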